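-- pv_equiv track=rewrite | github.com/ottojonas/utility-scripts | schoolCodeExercises/pythonGeneral/harshadNumber.py | nthHarshad
-- ===== SOURCE A (Python) =====
-- def isHarshad(number):
--     digitSum = 0
--     for digit in str(number):
--         digitSum += int(digit)
--     return number % digitSum == 0
--
-- def nthHarshad(number):
--     count = 0
--     num = 1
--     while True:
--         if isHarshad(num):
--             count += 1
--             if count == number:
--                 return num
--         num += 1
-- ===== SOURCE B (Python) =====
-- def nthHarshad(number):
--     count = 0
--     p = 0
--     while True:
--         s, t = 0, p
--         while t > 0:
--             s += t % 10
--             t //= 10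
--         for d in range(10):
--             num = 10 * p + d
--             if num == 0:
--                 continue
--             if num % (s + d) == 0:
--                 count += 1
--                 if count == number:
--                     return num
--         p += 1
-- ===== Notes on version B (the rewrite author's own statement) =====
-- stated objective: faster
-- what changed: B scans in blocks of ten (decades): it computes one arithmetic digit sum s of the prefix p per block and tests each member 10*p+d against s+d, instead of A's per-number str()/int() digit-sum inside a count-up infinite loop.
import Mathlib
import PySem

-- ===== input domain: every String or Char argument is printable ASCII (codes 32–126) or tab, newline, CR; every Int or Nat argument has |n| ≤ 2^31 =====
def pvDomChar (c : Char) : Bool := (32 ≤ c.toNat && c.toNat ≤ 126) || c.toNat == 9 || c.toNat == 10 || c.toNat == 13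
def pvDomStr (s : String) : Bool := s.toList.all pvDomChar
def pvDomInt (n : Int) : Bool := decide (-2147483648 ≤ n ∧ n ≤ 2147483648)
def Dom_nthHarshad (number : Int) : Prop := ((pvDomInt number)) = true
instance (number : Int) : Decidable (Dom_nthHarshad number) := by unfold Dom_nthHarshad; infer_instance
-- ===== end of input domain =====

-- B scans in blocks of ten: one arithmetic digit sum s of the prefix p per decade, each member
-- 10*p+d tested against s+d, instead of A's per-number str()/int() digit sum (alternative).
-- Both loops are unbounded in Python; the ports run them on fuel that is plumbing only: the
-- n-th Harshad number is far below what the fuel allows, so it is never exhausted under Pre_.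

-- ===== PORT A =====
-- A's digit sum: for digit in str(number): digitSum += int(digit)
def strDigitSum (n : Int) : Int :=
  (PySem.Int.toChars n).foldl (fun s c => s + (PySem.Int.ofChars? [c]).getD 0) 0

-- number % digitSum == 0  (digitSum is never 0 for the num ≥ 1 this is applied to,
-- so Python's ZeroDivisionError branch is unreachable and total mod is exact)
def isHarshad (n : Int) : Bool := PySem.Int.mod n (strDigitSum n) == 0

-- A's 'while True' loop; fuel 0 is unreachable under Pre_ within evaluated depth
def loopA (fuel : Nat) (number count num : Int) : Int :=
  match fuel with
  | 0 => 0
  | f + 1 =>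
    if isHarshad num then
      (if count + 1 == number then num else loopA f number (count + 1) (num + 1))
    else loopA f number count (num + 1)

def nthHarshad (number : Int) : Int := loopA (9 + 10 * 10 ^ number.toNat) number 0 1

-- ===== PORT B =====
-- B's inner 'while t > 0: s += t % 10; t //= 10' computing the digit sum of the prefix p
def digitSumArith (n : Int) : Int :=
  if _h : 0 < n then
    PySem.Int.mod n 10 + digitSumArith (PySem.Int.floordiv n 10)
  else 0
termination_by n.toNat
decreasing_by
  simp only [PySem.Int.floordiv_eq_ediv_of_pos (by omega : (0:Int) < 10)]
  omega

-- B's 'for d in range(10)' over one decade: returns the answer (.inl) or the new count (.inr)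
def decadeB (ds : List Int) (number count p s : Int) : Int ⊕ Int :=
  match ds with
  | [] => .inr count
  | d :: ds =>
    let num := 10 * p + d
    if num == 0 then decadeB ds number count p s
    else if PySem.Int.mod num (s + d) == 0 then
      (if count + 1 == number then .inl num else decadeB ds number (count + 1) p s)
    else decadeB ds number count p s

-- B's outer 'while True' loop over prefixes p; fuel 0 unreachable under Pre_ as for A
def loopB (fuel : Nat) (number count p : Int) : Int :=
  match fuel with
  | 0 => 0
  | f + 1 =>
    match decadeB (PySem.List.pyRange 0 10 1) number count p (digitSumArith p) with
    | .inl num => num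
    | .inr c => loopB f number c (p + 1)

def nthHarshad_alt (number : Int) : Int := loopB (10 ^ number.toNat + 1) number 0 0

-- ===== PRECONDITION & SPEC =====
-- Pre_ excludes number ≤ 0, on which A's while-True loop never returns (it diverges).
def Pre_nthHarshad (number : Int) : Prop := 1 ≤ number
instance (number : Int) : Decidable (Pre_nthHarshad number) := by
  unfold Pre_nthHarshad; infer_instance

def pvWitness_nthHarshad : Int := 3

def Spec_nthHarshad (number : Int) (out : Int) : Prop := out = nthHarshad_alt number
instance (number : Int) (out : Int) : Decidable (Spec_nthHarshad number out) := by
  unfold Spec_nthHarshad; infer_instance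

-- ===== CLAIM (what is proved, stated in full; the proofs are below) =====
def Claim_equal_nthHarshad : Prop :=
  ∀ (number : Int), Dom_nthHarshad number → Pre_nthHarshad number →
    Spec_nthHarshad number (nthHarshad number)

-- ===== LEMMAS AND PROOFS =====

-- value of a single digit character under int()
lemma ofChars_digitChar (r : Nat) (h : r < 10) :
    (PySem.Int.ofChars? [Nat.digitChar r]).getD 0 = (r : Int) := by
  interval_cases r <;> decide

-- Nat-side arithmetic digit sum, the common reference point
def natDS (m : Nat) : Int :=
  if m = 0 then 0 else (m % 10 : Nat) + natDS (m / 10)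
decreasing_by omega

lemma digitSumArith_natCast (m : Nat) : digitSumArith (m : Int) = natDS m := by
  induction m using Nat.strong_induction_on with
  | _ m ih =>
    rw [digitSumArith, natDS]
    by_cases h : m = 0
    · simp [h]
    · have hpos : (0 : Int) < (m : Int) := by exact_mod_cast Nat.pos_of_ne_zero h
      have h1 : PySem.Int.mod (m : Int) 10 = ((m % 10 : Nat) : Int) := by
        exact_mod_cast PySem.Int.mod_natCast m 10
      have h2 : PySem.Int.floordiv (m : Int) 10 = ((m / 10 : Nat) : Int) := by
        exact_mod_cast PySem.Int.floordiv_natCast m 10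
      rw [dif_pos hpos, if_neg h, h1, h2, ih (m / 10) (by omega)]

-- the digit-character sum of Nat.toDigitsCore, with enough fuel
lemma toDigitsCore_sum (f : Nat) : ∀ (m : Nat) (ds : List Char), m < f →
    ((Nat.toDigitsCore 10 f m ds).map (fun c => (PySem.Int.ofChars? [c]).getD 0)).sum
      = natDS m + ((ds.map (fun c => (PySem.Int.ofChars? [c]).getD 0)).sum) := by
  induction f with
  | zero => intro m ds h; omega
  | succ f ih =>
    intro m ds h
    rw [show Nat.toDigitsCore 10 (f + 1) m ds
        = (if m / 10 = 0 then (m % 10).digitChar :: ds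
           else Nat.toDigitsCore 10 f (m / 10) ((m % 10).digitChar :: ds)) from rfl]
    by_cases h10 : m / 10 = 0
    · rw [if_pos h10]
      simp only [List.map_cons, List.sum_cons,
        ofChars_digitChar (m % 10) (Nat.mod_lt _ (by omega))]
      by_cases hm : m = 0
      · subst hm; rw [natDS]; simp
      · rw [natDS, if_neg hm, natDS, if_pos h10]
        push_cast; ring
    · rw [if_neg h10]
      rw [ih (m / 10) _ (by omega)]
      simp only [List.map_cons, List.sum_cons,
        ofChars_digitChar (m % 10) (Nat.mod_lt _ (by omega))]
      conv_rhs => rw [natDS, if_neg (by omega : ¬ m = 0)]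
      ring

-- A's string digit sum equals B's arithmetic digit sum on positive inputs
lemma strDigitSum_eq (n : Int) (h : 1 ≤ n) : strDigitSum n = digitSumArith n := by
  obtain ⟨m, rfl⟩ : ∃ m : Nat, n = (m : Int) :=
    ⟨n.toNat, (Int.toNat_of_nonneg (by omega)).symm⟩
  have hm : m ≠ 0 := by omega
  rw [strDigitSum, digitSumArith_natCast, PySem.Int.toChars]
  rw [if_neg (by omega : ¬ (m : Int) < 0)]
  rw [PySem.List.foldl_add, Int.toNat_natCast, Nat.toDigits,
    toDigitsCore_sum (m + 1) m [] (by omega)]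
  simp

-- the digit sum of a decade member 10*p+d is the prefix digit sum plus d
lemma ds_shift (p d : Int) (hp : 0 ≤ p) (hd0 : 0 ≤ d) (hd : d < 10)
    (hnz : 1 ≤ 10 * p + d) : digitSumArith (10 * p + d) = digitSumArith p + d := by
  obtain ⟨m, rfl⟩ : ∃ m : Nat, p = (m : Int) :=
    ⟨p.toNat, (Int.toNat_of_nonneg hp).symm⟩
  obtain ⟨n, rfl⟩ : ∃ n : Nat, d = (n : Int) :=
    ⟨d.toNat, (Int.toNat_of_nonneg hd0).symm⟩
  have h1 : (10 : Int) * m + n = ((10 * m + n : Nat) : Int) := by push_cast; ring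
  rw [h1, digitSumArith_natCast, digitSumArith_natCast, natDS,
    if_neg (by omega : ¬ 10 * m + n = 0)]
  have h2 : (10 * m + n) % 10 = n := by omega
  have h3 : (10 * m + n) / 10 = m := by omega
  rw [h2, h3]; ring

-- A's Harshad test at 10*p+d, via the shared prefix digit sum
lemma isHarshad_shift (p d : Int) (hp : 0 ≤ p) (hd0 : 0 ≤ d) (hd : d < 10)
    (h1 : 1 ≤ 10 * p + d) :
    isHarshad (10 * p + d) = (PySem.Int.mod (10 * p + d) (digitSumArith p + d) == 0) := by
  rw [isHarshad, strDigitSum_eq _ h1, ds_shift p d hp hd0 hd h1]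

-- decadeB never returns a count ≥ number when it starts below it
lemma decadeB_inr_lt : ∀ (ds : List Int) (number count p s c : Int), count < number →
    decadeB ds number count p s = .inr c → c < number := by
  intro ds
  induction ds with
  | nil => intro number count p s c hlt h; rw [decadeB] at h; cases h; exact hlt
  | cons d ds ih =>
    intro number count p s c hlt h
    rw [decadeB] at h
    by_cases h0 : (10 * p + d == 0) = true
    · rw [if_pos h0] at h; exact ih number count p s c hlt h
    · rw [if_neg h0] at h
      by_cases hm : (PySem.Int.mod (10 * p + d) (s + d) == 0) = true
      · rw [if_pos hm] at h
        by_cases hc : (count + 1 == number) = true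
        · rw [if_pos hc] at h; cases h
        · rw [if_neg hc] at h
          exact ih number (count + 1) p s c (by simp at hc; omega) h
      · rw [if_neg hm] at h; exact ih number count p s c hlt h

-- A's loop over the tail d0..9 of a decade equals one decadeB pass then the next decade
lemma decade_lemma : ∀ (k : Nat) (d0 : Int), d0 = 10 - (k : Int) → k ≤ 10 →
    ∀ (rest : Nat) (number count p : Int), count < number → 0 ≤ p → 1 ≤ 10 * p + d0 →
    loopA (k + rest) number count (10 * p + d0)
      = (match decadeB (PySem.List.pyRange d0 10 1) number count p (digitSumArith p) with
         | .inl num => num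
         | .inr c => loopA rest number c (10 * (p + 1))) := by
  intro k
  induction k with
  | zero =>
    intro d0 hd0 _ rest number count p hlt hp hnz
    subst hd0
    rw [PySem.List.pyRange_one_eq_nil (by norm_num), decadeB]
    norm_num
    rw [show (10 : Int) * p + 10 = 10 * (p + 1) from by ring]
  | succ k ih =>
    intro d0 hd0 hk rest number count p hlt hp hnz
    have hdlt : d0 < 10 := by omega
    have hd0nn : 0 ≤ d0 := by omega
    rw [PySem.List.pyRange_one_cons hdlt, decadeB]
    simp only [show ((10 * p + d0 : Int) == 0) = false from by
      simp only [beq_eq_false_iff_ne]; omega, Bool.false_eq_true, if_false]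
    rw [show k + 1 + rest = (k + rest) + 1 from by ring, loopA,
      isHarshad_shift p d0 hp hd0nn hdlt hnz]
    by_cases hH : (PySem.Int.mod (10 * p + d0) (digitSumArith p + d0) == 0) = true
    · rw [if_pos hH, if_pos hH]
      by_cases hc : (count + 1 == number) = true
      · rw [if_pos hc, if_pos hc]
      · rw [if_neg hc, if_neg hc,
          show 10 * p + d0 + 1 = 10 * p + (d0 + 1) from by ring,
          ih (d0 + 1) (by omega) (by omega) rest number (count + 1) p
            (by simp at hc; omega) hp (by omega)]
    · rw [if_neg hH, if_neg hH,
        show 10 * p + d0 + 1 = 10 * p + (d0 + 1) from by ring,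
        ih (d0 + 1) (by omega) (by omega) rest number count p hlt hp (by omega)]

-- full decades: A's loop from 10*p equals B's outer loop at p, fuel 10-for-1
lemma outer_eq : ∀ (F : Nat) (number count p : Int), count < number → 1 ≤ p →
    loopA (10 * F) number count (10 * p) = loopB F number count p := by
  intro F
  induction F with
  | zero => intro number count p _ _; rfl
  | succ F ih =>
    intro number count p hlt hp
    rw [loopB, show 10 * (F + 1) = 10 + 10 * F from by ring,
      show (10 : Int) * p = 10 * p + 0 from by ring,
      decade_lemma 10 0 (by norm_num) (by norm_num) (10 * F) number count p hlt
        (by omega) (by omega)]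
    cases hdec : decadeB (PySem.List.pyRange 0 10 1) number count p (digitSumArith p) with
    | inl num => rfl
    | inr c =>
      dsimp only
      exact ih number c (p + 1) (decadeB_inr_lt _ number count p _ c hlt hdec) (by omega)

-- ===== VERDICT (by name: the statement is the Claim_ definition above) =====
theorem nthHarshad_spec : Claim_equal_nthHarshad := by
  intro number _ hpre
  unfold Spec_nthHarshad nthHarshad nthHarshad_alt
  rw [show (1 : Int) = 10 * 0 + 1 from by ring,
    decade_lemma 9 1 (by norm_num) (by norm_num) (10 * 10 ^ number.toNat) number 0 0
      hpre (by omega) (by omega)]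
  rw [loopB]
  rw [show PySem.List.pyRange 0 10 1 = 0 :: PySem.List.pyRange 1 10 1 from
    PySem.List.pyRange_one_cons (by norm_num)]
  rw [decadeB]
  norm_num
  cases hdec : decadeB (PySem.List.pyRange 1 10 1) number 0 0 (digitSumArith 0) with
  | inl num => rfl
  | inr c =>
    dsimp only
    have h := outer_eq (10 ^ number.toNat) number c 1
      (decadeB_inr_lt _ number 0 0 _ c hpre hdec) (by omega)
    norm_num at h
    exact h
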